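-- pv_equiv track=rewrite | github.com/Srinivas-18/VPN-Detection-De-anonymization-Tool | deanon/encrypted_traffic_analyzer.py | _detect_padding_patterns
-- ===== SOURCE A (Python) =====
-- from typing import Dict, List, Tuple, Optional
--
-- def _detect_padding_patterns(sizes: List[int]) -> Dict:
--     """Detect traffic padding patterns"""
--     if not sizes:
--         return {}
--
--     # Common padding sizes
--     padding_sizes = [64, 128, 256, 512, 1024]
--     padding_detected = {}
--
--     for pad_size in padding_sizes:
--         count = len([s for s in sizes if abs(s - pad_size) <= 10])
--         padding_detected[f'padding_{pad_size}'] = count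
--
--     return padding_detected
-- ===== SOURCE B (Python) =====
-- from typing import Dict, List
--
-- def _detect_padding_patterns(sizes: List[int]) -> Dict:
--     """Detect traffic padding patterns"""
--     if not sizes:
--         return {}
--
--     c64 = c128 = c256 = c512 = c1024 = 0
--     for s in sizes:
--         if abs(s - 64) <= 10:
--             c64 += 1
--         elif abs(s - 128) <= 10:
--             c128 += 1
--         elif abs(s - 256) <= 10:
--             c256 += 1
--         elif abs(s - 512) <= 10:
--             c512 += 1
--         elif abs(s - 1024) <= 10:
--             c1024 += 1
--
--     return {
--         'padding_64': c64,
--         'padding_128': c128,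
--         'padding_256': c256,
--         'padding_512': c512,
--         'padding_1024': c1024,
--     }
-- ===== Notes on version B (the rewrite author's own statement) =====
-- stated objective: alternative
-- what changed: Replaces A's five separate filter-and-count scans over sizes with a single pass maintaining five counters (the windows are disjoint, so an if/elif chain assigns each size to at most one bucket), building the dict once at the end.
import Mathlib
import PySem

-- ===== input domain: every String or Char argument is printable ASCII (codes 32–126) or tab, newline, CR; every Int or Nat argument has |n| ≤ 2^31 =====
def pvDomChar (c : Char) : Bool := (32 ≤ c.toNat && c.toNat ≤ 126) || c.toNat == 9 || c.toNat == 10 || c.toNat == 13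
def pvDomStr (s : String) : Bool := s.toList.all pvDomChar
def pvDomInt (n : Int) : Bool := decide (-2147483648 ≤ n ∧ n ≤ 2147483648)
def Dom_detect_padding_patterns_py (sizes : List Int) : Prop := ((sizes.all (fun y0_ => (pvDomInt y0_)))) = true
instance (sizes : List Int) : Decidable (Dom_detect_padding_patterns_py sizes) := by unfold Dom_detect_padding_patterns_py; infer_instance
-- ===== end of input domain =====

-- B replaces A's five filter-and-count scans by a single pass that keeps five counters (the windows are disjoint).

-- ===== PORT A =====
def detect_padding_patterns_py (sizes : List Int) : List (String × Int) :=
  if sizes = [] then []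
  else
    (([64, 128, 256, 512, 1024] : List Int).foldl
      (fun d pad =>
        PySem.Dict.insert d ("padding_" ++ PySem.Int.toStr pad)
          ((sizes.filter (fun s => decide ((s - pad).natAbs ≤ 10))).length : Int))
      PySem.Dict.empty).items

-- ===== PORT B =====
def pvAltStep (c : Int × Int × Int × Int × Int) (s : Int) : Int × Int × Int × Int × Int :=
  if (s - 64).natAbs ≤ 10 then (c.1 + 1, c.2.1, c.2.2.1, c.2.2.2.1, c.2.2.2.2)
  else if (s - 128).natAbs ≤ 10 then (c.1, c.2.1 + 1, c.2.2.1, c.2.2.2.1, c.2.2.2.2)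
  else if (s - 256).natAbs ≤ 10 then (c.1, c.2.1, c.2.2.1 + 1, c.2.2.2.1, c.2.2.2.2)
  else if (s - 512).natAbs ≤ 10 then (c.1, c.2.1, c.2.2.1, c.2.2.2.1 + 1, c.2.2.2.2)
  else if (s - 1024).natAbs ≤ 10 then (c.1, c.2.1, c.2.2.1, c.2.2.2.1, c.2.2.2.2 + 1)
  else c

def detect_padding_patterns_py_alt (sizes : List Int) : List (String × Int) :=
  if sizes = [] then []
  else
    let r := sizes.foldl pvAltStep (0, 0, 0, 0, 0)
    [("padding_64", r.1), ("padding_128", r.2.1), ("padding_256", r.2.2.1),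
     ("padding_512", r.2.2.2.1), ("padding_1024", r.2.2.2.2)]

-- ===== PRECONDITION & SPEC =====
def Spec_detect_padding_patterns_py (sizes : List Int) (out : List (String × Int)) : Prop := out = detect_padding_patterns_py_alt sizes
instance (sizes : List Int) (out : List (String × Int)) : Decidable (Spec_detect_padding_patterns_py sizes out) := by unfold Spec_detect_padding_patterns_py; infer_instance

-- ===== CLAIM (what is proved, stated in full; the proofs are below) =====
def Claim_equal_detect_padding_patterns_py : Prop := ∀ (sizes : List Int), Dom_detect_padding_patterns_py sizes → Spec_detect_padding_patterns_py sizes (detect_padding_patterns_py sizes)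

-- ===== LEMMAS AND PROOFS =====

-- The five window predicates are pairwise disjoint, so each elif guard of B
-- is equivalent to the plain window test A uses.
lemma pvAltLoop_eq (sizes : List Int) (c : Int × Int × Int × Int × Int) :
    sizes.foldl pvAltStep c =
      (c.1 + (sizes.countP (fun s => decide ((s - 64).natAbs ≤ 10)) : Int),
       c.2.1 + (sizes.countP (fun s => decide ((s - 128).natAbs ≤ 10)) : Int),
       c.2.2.1 + (sizes.countP (fun s => decide ((s - 256).natAbs ≤ 10)) : Int),
       c.2.2.2.1 + (sizes.countP (fun s => decide ((s - 512).natAbs ≤ 10)) : Int),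
       c.2.2.2.2 + (sizes.countP (fun s => decide ((s - 1024).natAbs ≤ 10)) : Int)) := by
  induction sizes generalizing c with
  | nil => simp
  | cons x xs ih =>
    simp only [List.foldl_cons, List.countP_cons, ih, pvAltStep]
    split_ifs <;>
      · simp only [Prod.mk.injEq, decide_eq_true_eq] at *
        push_cast
        refine ⟨?_, ?_, ?_, ?_, ?_⟩ <;> omega

theorem detect_padding_patterns_py_spec : Claim_equal_detect_padding_patterns_py := by
  intro sizes _
  show detect_padding_patterns_py sizes = detect_padding_patterns_py_alt sizes
  unfold detect_padding_patterns_py detect_padding_patterns_py_alt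
  by_cases h : sizes = []
  · simp [h]
  · simp only [h, if_false]
    simp only [List.foldl_cons, List.foldl_nil]
    rw [show ("padding_" ++ PySem.Int.toStr 64) = "padding_64" from by decide,
        show ("padding_" ++ PySem.Int.toStr 128) = "padding_128" from by decide,
        show ("padding_" ++ PySem.Int.toStr 256) = "padding_256" from by decide,
        show ("padding_" ++ PySem.Int.toStr 512) = "padding_512" from by decide,
        show ("padding_" ++ PySem.Int.toStr 1024) = "padding_1024" from by decide]
    simp [PySem.Dict.insert, PySem.Dict.empty, PySem.Dict.contains, pvAltLoop_eq]
    refine ⟨?_, ?_, ?_, ?_, ?_⟩ <;> exact List.countP_eq_length_filter.symm
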